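-- pv_equiv track=rewrite | github.com/eunsu-park/ap-project | 03_Regression/src/pipeline.py | days_to_indices_omni
-- ===== SOURCE A (Python) =====
-- from typing import Dict, List, Tuple, Optional, Union
--
-- def days_to_indices_omni(days: List[int], base_offset_hours: int = -168) -> Tuple[int, int]:
--     """Convert day list to OMNI array indices.
--
--     OMNI data uses 3-hour intervals (8 points per day).
--     Days are numbered: -7 to -1 (input), 1 to 3 (target).
--     Day 0 does not exist (reference time is boundary).
--
--     Args:
--         days: List of day numbers (negative for input, positive for target)
--               Examples: [-7, -6, -5] or [1, 2, 3]
--         base_offset_hours: Starting offset in hours (default: -168 = -7 days)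
--
--     Returns:
--         Tuple of (start_index, end_index) for slicing
--
--     Examples:
--         >>> days_to_indices_omni([-7, -6, -5, -4, -3, -2, -1])  # All input days
--         (0, 56)
--         >>> days_to_indices_omni([1, 2, 3])  # All target days
--         (56, 80)
--         >>> days_to_indices_omni([-3, -2, -1])  # Last 3 input days
--         (32, 56)
--         >>> days_to_indices_omni([3])  # Day 3 only
--         (72, 80)
--     """
--     POINTS_PER_DAY = 8  # 24h / 3h = 8
--
--     # Convert days to indices
--     # Day -7 -> index 0, Day -1 -> index 48
--     # Day +1 -> index 56, Day +3 -> index 72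
--     indices = []
--     for day in sorted(days):
--         if day < 0:
--             # Input days: day -7 = 0, day -1 = 48
--             start_idx = (day + 7) * POINTS_PER_DAY
--         elif day > 0:
--             # Target days: day +1 = 56, day +3 = 72
--             start_idx = 56 + (day - 1) * POINTS_PER_DAY
--         else:
--             raise ValueError("Day 0 is not valid. Use negative days for input, positive for target.")
--         indices.append(start_idx)
--
--     start_index = min(indices)
--     # End index is start of last day + points per day
--     last_day = sorted(days)[-1]
--     if last_day < 0:
--         end_index = (last_day + 7 + 1) * POINTS_PER_DAY
--     else:
--         end_index = 56 + last_day * POINTS_PER_DAY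
--
--     return start_index, end_index
-- ===== SOURCE B (Python) =====
-- from typing import List, Tuple
--
--
-- def _day_start(day: int) -> int:
--     """Start index of a day: 8 points per day, day -7 -> 0, day +1 -> 56."""
--     return (day + 7) * 8 if day < 0 else 56 + (day - 1) * 8
--
--
-- def days_to_indices_omni(days: List[int], base_offset_hours: int = -168) -> Tuple[int, int]:
--     if any(day == 0 for day in days):
--         raise ValueError("Day 0 is not valid. Use negative days for input, positive for target.")
--     first, last = min(days), max(days)  # min/max raise ValueError on empty input, as A does
--     end_index = (last + 8) * 8 if last < 0 else 56 + last * 8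
--     return _day_start(first), end_index
-- ===== Notes on version B (the rewrite author's own statement) =====
-- stated objective: faster
-- what changed: Replaces two sorted() calls, the per-day index list and the min() over it with two linear min/max scans and a monotonic day-to-index formula applied to the extremes.
import Mathlib
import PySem

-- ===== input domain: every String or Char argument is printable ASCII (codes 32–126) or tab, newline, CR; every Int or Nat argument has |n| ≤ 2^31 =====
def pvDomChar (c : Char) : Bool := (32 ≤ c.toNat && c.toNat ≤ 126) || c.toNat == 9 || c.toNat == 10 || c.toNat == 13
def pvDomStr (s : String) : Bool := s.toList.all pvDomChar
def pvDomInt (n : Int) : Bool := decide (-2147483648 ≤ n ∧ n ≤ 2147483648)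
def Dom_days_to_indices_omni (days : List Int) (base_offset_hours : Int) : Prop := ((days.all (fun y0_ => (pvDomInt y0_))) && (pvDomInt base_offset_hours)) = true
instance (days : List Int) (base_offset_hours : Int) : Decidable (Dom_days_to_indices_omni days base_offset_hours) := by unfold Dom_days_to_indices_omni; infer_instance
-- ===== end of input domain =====

-- B: replaces sort + index list + min-over-list with min/max scans and a monotonic
-- day-to-start-index formula applied to the extremes (simpler; return value only).

-- ===== PORT A =====
-- loop body of A: start index of one day (the `else` branch stands for Python's raise,
-- reached only when day = 0, which Pre_ excludes)
def pvStartIdxA (day : Int) : Int :=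
  if day < 0 then (day + 7) * 8 else if day > 0 then 56 + (day - 1) * 8 else 0

def days_to_indices_omni (days : List Int) (base_offset_hours : Int) : Int × Int :=
  let indices := (PySem.List.sorted days (fun x => x)).foldl
    (fun acc day => acc ++ [pvStartIdxA day]) ([] : List Int)
  let start_index := (PySem.List.min? indices (fun x => x)).getD 0
  let last_day := (PySem.List.pyGet? (PySem.List.sorted days (fun x => x)) (-1)).getD 0
  let end_index := if last_day < 0 then (last_day + 7 + 1) * 8 else 56 + last_day * 8
  (start_index, end_index)

-- ===== PORT B =====
-- helper _day_start of Source B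
def pvDayStart (day : Int) : Int :=
  if day < 0 then (day + 7) * 8 else 56 + (day - 1) * 8

def days_to_indices_omni_alt (days : List Int) (base_offset_hours : Int) : Int × Int :=
  if days.any (fun day => day == 0) then (0, 0)  -- Source B raises ValueError here (outside Pre_)
  else
    match PySem.List.min? days (fun x => x), PySem.List.max? days (fun x => x) with
    | some first, some last =>
        (pvDayStart first, if last < 0 then (last + 8) * 8 else 56 + last * 8)
    | _, _ => (0, 0)  -- min/max raise ValueError on empty input (outside Pre_)

-- ===== PRECONDITION & SPEC =====
-- A raises ValueError on the empty list and whenever 0 ∈ days; Pre_ excludes exactly those.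
def Pre_days_to_indices_omni (days : List Int) (base_offset_hours : Int) : Prop :=
  days ≠ [] ∧ (0 : Int) ∉ days
instance (days : List Int) (base_offset_hours : Int) : Decidable (Pre_days_to_indices_omni days base_offset_hours) := by
  unfold Pre_days_to_indices_omni; infer_instance
def pvWitness_days_to_indices_omni : List Int × Int := ([-3, 2, -1], -168)

def Spec_days_to_indices_omni (days : List Int) (base_offset_hours : Int) (out : Int × Int) : Prop := out = days_to_indices_omni_alt days base_offset_hours
instance (days : List Int) (base_offset_hours : Int) (out : Int × Int) : Decidable (Spec_days_to_indices_omni days base_offset_hours out) := by unfold Spec_days_to_indices_omni; infer_instance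

-- ===== CLAIM (what is proved, stated in full; the proofs are below) =====
def Claim_equal_days_to_indices_omni : Prop := ∀ (days : List Int) (base_offset_hours : Int), Dom_days_to_indices_omni days base_offset_hours → Pre_days_to_indices_omni days base_offset_hours → Spec_days_to_indices_omni days base_offset_hours (days_to_indices_omni days base_offset_hours)

-- ===== LEMMAS AND PROOFS =====

-- ===== VERDICT (by name: the statement is the Claim_ definition above) =====
-- pvStartIdxA agrees with B's helper off 0, and both are monotone on nonzero days
theorem pvStartIdxA_eq (d : Int) (h : d ≠ 0) : pvStartIdxA d = pvDayStart d := by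
  unfold pvStartIdxA pvDayStart; split_ifs <;> omega

theorem pvStartIdxA_mono {a b : Int} (hb : b ≠ 0) (hab : a ≤ b) :
    pvStartIdxA a ≤ pvStartIdxA b := by
  unfold pvStartIdxA; split_ifs <;> omega

-- last element of a ≤-pairwise list bounds every element
theorem pv_getLast?_isMax {l : List Int} {L : Int} (hp : l.Pairwise (· ≤ ·))
    (hL : l.getLast? = some L) : ∀ x ∈ l, x ≤ L := by
  induction l with
  | nil => simp at hL
  | cons a t ih =>
    intro x hx
    cases t with
    | nil =>
      simp at hL hx; omega
    | cons b u =>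
      have hL' : (b :: u).getLast? = some L := by
        simpa [List.getLast?] using hL
      have ht := ih (List.Pairwise.sublist (by simp) hp) hL'
      rcases List.mem_cons.mp hx with rfl | hx'
      · have hbL : b ≤ L := ht b (by simp)
        have : x ≤ b := (List.pairwise_cons.mp hp).1 b (by simp)
        omega
      · exact ht x hx'

theorem days_to_indices_omni_spec : Claim_equal_days_to_indices_omni := by
  intro days base h hpre
  obtain ⟨hne, h0⟩ := hpre
  unfold Spec_days_to_indices_omni days_to_indices_omni days_to_indices_omni_alt
  -- B's zero check fails, B's min/max exist
  have hany : days.any (fun day => day == 0) = false := by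
    simp only [List.any_eq_false]
    intro d hd
    simp only [beq_iff_eq]
    intro hd0; exact h0 (hd0 ▸ hd)
  obtain ⟨m, hm⟩ : ∃ m, PySem.List.min? days (fun x => x) = some m := by
    rcases hmm : PySem.List.min? days (fun x => x) with _ | m
    · exact absurd ((PySem.List.min?_eq_none_iff _ _).mp hmm) hne
    · exact ⟨m, rfl⟩
  obtain ⟨M, hM⟩ : ∃ M, PySem.List.max? days (fun x => x) = some M := by
    rcases hmm : PySem.List.max? days (fun x => x) with _ | M
    · exact absurd ((PySem.List.max?_eq_none_iff _ _).mp hmm) hne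
    · exact ⟨M, rfl⟩
  have hmMem : m ∈ days := PySem.List.min?_mem hm
  have hMMem : M ∈ days := PySem.List.max?_mem hM
  have hmMin : ∀ y ∈ days, m ≤ y := PySem.List.min?_isMin hm
  have hMMax : ∀ y ∈ days, y ≤ M := PySem.List.max?_isMax hM
  have hm0 : m ≠ 0 := fun hh => h0 (hh ▸ hmMem)
  have hM0 : M ≠ 0 := fun hh => h0 (hh ▸ hMMem)
  set sdays := PySem.List.sorted days (fun x => x) false with hs
  have hsne : sdays ≠ [] := fun hh => hne ((PySem.List.sorted_eq_nil_iff _ _ _).mp hh)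
  have hsmem : ∀ y, y ∈ sdays ↔ y ∈ days := fun y => PySem.List.mem_sorted _ _ _ _
  -- indices list is a map
  have hfold : sdays.foldl (fun acc day => acc ++ [pvStartIdxA day]) ([] : List Int)
      = sdays.map pvStartIdxA := by
    simpa using PySem.List.foldl_append_singleton_eq_map pvStartIdxA sdays []
  -- A's start index = pvStartIdxA m
  have hstart : (PySem.List.min? (sdays.map pvStartIdxA) (fun x => x)).getD 0 = pvStartIdxA m := by
    obtain ⟨k, hk⟩ : ∃ k, PySem.List.min? (sdays.map pvStartIdxA) (fun x => x) = some k := by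
      rcases hmm : PySem.List.min? (sdays.map pvStartIdxA) (fun x => x) with _ | k
      · have := (PySem.List.min?_eq_none_iff _ _).mp hmm
        simp only [List.map_eq_nil_iff] at this
        exact absurd this hsne
      · exact ⟨k, rfl⟩
    obtain ⟨x, hx, hxk⟩ := List.mem_map.mp (PySem.List.min?_mem hk)
    have hxd : x ∈ days := (hsmem x).mp hx
    have hkle : k ≤ pvStartIdxA m :=
      PySem.List.min?_isMin hk (pvStartIdxA m) (List.mem_map.mpr ⟨m, (hsmem m).mpr hmMem, rfl⟩)
    have hmle : pvStartIdxA m ≤ k := hxk ▸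
      pvStartIdxA_mono (fun hh => h0 (hh ▸ hxd)) (hmMin x hxd)
    rw [hk]; exact le_antisymm hkle hmle
  -- A's last day = M
  have hlast : (PySem.List.pyGet? sdays (-1)).getD 0 = M := by
    rw [PySem.List.pyGet?_neg_one]
    obtain ⟨L, hL⟩ : ∃ L, sdays.getLast? = some L := by
      rcases hgl : sdays.getLast? with _ | L
      · exact absurd (List.getLast?_eq_none_iff.mp hgl) hsne
      · exact ⟨L, rfl⟩
    have hLmem : L ∈ days := (hsmem L).mp (List.mem_of_getLast? hL)
    have hpw : sdays.Pairwise (· ≤ ·) := by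
      have := PySem.List.sorted_pairwise (xs := days) (key := fun x => x)
      simpa using this
    have hML : M ≤ L := pv_getLast?_isMax hpw hL M ((hsmem M).mpr hMMem)
    have hLM : L ≤ M := hMMax L hLmem
    rw [hL]; simp; omega
  simp only [hany, hfold, hm, hM, Bool.false_eq_true, if_false]
  rw [hstart, hlast, pvStartIdxA_eq m hm0]
  unfold pvDayStart
  split_ifs <;> simp <;> omega
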